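-- pv_equiv track=rewrite | github.com/gfajardo95/CrackingPython | array_questions/question_2.py | is_perm_v1
-- ===== SOURCE A (Python) =====
-- def map_chars_to_occurrence(str):
--     string_map = {}
--
--     for char in str:
--         if char in string_map:
--             string_map[char] += 1
--         else:
--             string_map[char] = 1
--
--     return string_map
--
-- def is_perm_v1(str1, str2):
--     if len(str1) < len(str2):
--         return False
--     else:
--         # map the chars to their count
--         char_count = map_chars_to_occurrence(str1)
--
--     for char in str2:
--         if char in char_count:
--             char_count[char] -= 1
--             if char_count[char] < 0:
--                 return False
--         else:
--             return False
--
--     return True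
-- ===== SOURCE B (Python) =====
-- def is_perm_v1(str1, str2):
--     # Count both strings into frequency tables, then check that str2's
--     # table is dominated by str1's.  No length guard needed: if str2 is
--     # longer, some character count necessarily exceeds its count in str1.
--     c1 = {}
--     for ch in str1:
--         c1[ch] = c1.get(ch, 0) + 1
--     c2 = {}
--     for ch in str2:
--         c2[ch] = c2.get(ch, 0) + 1
--     return all(c1.get(ch, 0) >= n for ch, n in c2.items())
-- ===== Notes on version B (the rewrite author's own statement) =====
-- stated objective: idiomatic
-- what changed: B counts both strings into frequency tables and checks that str2's table is dominated by str1's, instead of A's single mutating decrement pass with early exit and its (redundant) length guard.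
import Mathlib
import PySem

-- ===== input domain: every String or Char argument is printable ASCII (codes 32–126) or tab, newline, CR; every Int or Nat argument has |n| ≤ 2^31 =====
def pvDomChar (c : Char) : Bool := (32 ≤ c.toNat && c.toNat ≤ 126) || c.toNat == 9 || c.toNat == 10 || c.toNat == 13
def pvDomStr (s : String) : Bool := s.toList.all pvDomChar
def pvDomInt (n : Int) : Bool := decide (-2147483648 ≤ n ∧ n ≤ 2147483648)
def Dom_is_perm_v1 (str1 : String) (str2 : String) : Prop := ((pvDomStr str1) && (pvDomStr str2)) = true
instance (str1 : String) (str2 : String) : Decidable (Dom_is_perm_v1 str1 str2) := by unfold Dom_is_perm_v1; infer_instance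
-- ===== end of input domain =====

-- B counts both strings into frequency tables and checks domination, instead of A's
-- mutating decrement pass with early exit and its redundant length guard (idiomatic).

-- ===== PORT A =====
-- helper map_chars_to_occurrence: build the char → count dict of str
def mapCharsToOccurrence (s : String) : PySem.Dict Char Int :=
  s.toList.foldl
    (fun d c => if d.contains c then d.insert c (d.getD c 0 + 1) else d.insert c 1)
    PySem.Dict.empty

-- the 'for char in str2' loop with its two early returns
def permLoopA (d : PySem.Dict Char Int) : List Char → Bool
  | [] => true
  | c :: rest =>
    if d.contains c then
      let d' := d.modify c 0 (· - 1)        -- char_count[char] -= 1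
      if d'.getD c 0 < 0 then false         -- if char_count[char] < 0: return False
      else permLoopA d' rest
    else false                              -- char not in char_count: return False

def is_perm_v1 (str1 : String) (str2 : String) : Bool :=
  if PySem.Str.len str1 < PySem.Str.len str2 then false
  else permLoopA (mapCharsToOccurrence str1) str2.toList

-- ===== PORT B =====
def is_perm_v1_alt (str1 : String) (str2 : String) : Bool :=
  let c1 : PySem.Dict Char Int :=
    str1.toList.foldl (fun d c => d.insert c (d.getD c 0 + 1)) PySem.Dict.empty
  let c2 : PySem.Dict Char Int :=
    str2.toList.foldl (fun d c => d.insert c (d.getD c 0 + 1)) PySem.Dict.empty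
  c2.items.all (fun p => c1.getD p.1 0 ≥ p.2)

-- ===== PRECONDITION & SPEC =====
def Spec_is_perm_v1 (str1 : String) (str2 : String) (out : Bool) : Prop := out = is_perm_v1_alt str1 str2
instance (str1 : String) (str2 : String) (out : Bool) : Decidable (Spec_is_perm_v1 str1 str2 out) := by unfold Spec_is_perm_v1; infer_instance

-- ===== CLAIM (what is proved, stated in full; the proofs are below) =====
def Claim_equal_is_perm_v1 : Prop := ∀ (str1 : String) (str2 : String), Dom_is_perm_v1 str1 str2 → Spec_is_perm_v1 str1 str2 (is_perm_v1 str1 str2)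

-- ===== LEMMAS AND PROOFS =====

-- A's count builder is Counter: both branches insert d.getD c 0 + 1
theorem mco_eq_counter (s : String) :
    mapCharsToOccurrence s = PySem.Dict.counter s.toList := by
  unfold mapCharsToOccurrence
  have hf : (fun (d : PySem.Dict Char Int) c =>
      if d.contains c then d.insert c (d.getD c 0 + 1) else d.insert c 1)
      = fun d c => d.insert c (d.getD c 0 + 1) := by
    funext d c
    by_cases h : d.contains c = true
    · rw [if_pos h]
    · rw [if_neg h]
      simp only [Bool.not_eq_true] at h
      rw [PySem.Dict.getD_of_not_contains d 0 h]
      norm_num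
  rw [hf, PySem.Dict.foldl_insert_getD_add_one_eq_counter]

-- characterisation of A's decrement loop
theorem permLoopA_spec (l : List Char) (d : PySem.Dict Char Int) :
    permLoopA d l
      = decide (∀ c ∈ l, d.contains c = true ∧ (l.count c : Int) ≤ d.getD c 0) := by
  induction l generalizing d with
  | nil => simp [permLoopA]
  | cons c rest ih =>
    by_cases hc : d.contains c = true
    · have hgetc : (d.modify c 0 (· - 1)).getD c 0 = d.getD c 0 - 1 :=
        PySem.Dict.getD_modify_self d c 0 (· - 1)
      by_cases hneg : d.getD c 0 - 1 < 0
      · rw [show permLoopA d (c :: rest) = false from by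
          simp [permLoopA, hc, hgetc, hneg]]
        symm; apply decide_eq_false
        intro h
        have h2 := (h c List.mem_cons_self).2
        rw [List.count_cons_self] at h2
        push_cast at h2
        omega
      · rw [show permLoopA d (c :: rest) = permLoopA (d.modify c 0 (· - 1)) rest from by
          simp [permLoopA, hc, hgetc, hneg]]
        rw [ih, Bool.eq_iff_iff]
        simp only [decide_eq_true_eq]
        constructor
        · intro h x hx
          by_cases hxc : x = c
          · subst hxc
            refine ⟨hc, ?_⟩
            rw [List.count_cons_self]
            push_cast
            by_cases hxr : x ∈ rest
            · have h2 := (h x hxr).2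
              rw [hgetc] at h2
              omega
            · rw [List.count_eq_zero_of_not_mem hxr]
              push_cast
              omega
          · have hxr : x ∈ rest := by
              rcases List.mem_cons.mp hx with h' | h'
              · exact absurd h' hxc
              · exact h'
            have h1 := (h x hxr).1
            rw [PySem.Dict.contains_modify] at h1
            simp [hxc] at h1
            refine ⟨h1, ?_⟩
            have h2 := (h x hxr).2
            rw [PySem.Dict.getD_modify_of_ne d 0 (· - 1) hxc] at h2
            rw [List.count_cons_of_ne (Ne.symm hxc)]
            exact h2
        · intro h x hx
          refine ⟨?_, ?_⟩
          · rw [PySem.Dict.contains_modify]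
            have := (h x (List.mem_cons_of_mem c hx)).1
            simp [this]
          · by_cases hxc : x = c
            · subst hxc
              rw [hgetc]
              have h2 := (h x List.mem_cons_self).2
              rw [List.count_cons_self] at h2
              push_cast at h2
              omega
            · rw [PySem.Dict.getD_modify_of_ne d 0 (· - 1) hxc]
              have h2 := (h x (List.mem_cons_of_mem c hx)).2
              rw [List.count_cons_of_ne (Ne.symm hxc)] at h2
              exact h2
    · rw [show permLoopA d (c :: rest) = false from by simp [permLoopA, hc]]
      symm; apply decide_eq_false
      intro h
      exact hc (h c List.mem_cons_self).1

-- B equals the pure count-domination condition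
theorem alt_eq_decide (str1 str2 : String) :
    is_perm_v1_alt str1 str2
      = decide (∀ c ∈ str2.toList, str2.toList.count c ≤ str1.toList.count c) := by
  unfold is_perm_v1_alt
  simp only [PySem.Dict.foldl_insert_getD_add_one_eq_counter, PySem.Dict.items_counter,
    List.all_map]
  rw [Bool.eq_iff_iff]
  simp only [List.all_eq_true, Function.comp, PySem.Dict.getD_counter, ge_iff_le,
    decide_eq_true_eq]
  constructor
  · intro h c hc
    have := h c ((PySem.Set.mem_ofList _ _).mpr hc)
    exact_mod_cast this
  · intro h c hc
    have := h c ((PySem.Set.mem_ofList _ _).mp hc)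
    exact_mod_cast this

-- A equals the same condition (the contains clause and the length guard are implied)
theorem a_eq_decide (str1 str2 : String) :
    is_perm_v1 str1 str2
      = decide (∀ c ∈ str2.toList, str2.toList.count c ≤ str1.toList.count c) := by
  unfold is_perm_v1
  by_cases hlen : PySem.Str.len str1 < PySem.Str.len str2
  · rw [if_pos hlen]
    symm; apply decide_eq_false
    intro h
    have hsub : str2.toList.Subperm str1.toList := List.subperm_ext_iff.mpr h
    have hle := hsub.length_le
    simp only [PySem.Str.len_eq] at hlen
    omega
  · rw [if_neg hlen, mco_eq_counter, permLoopA_spec]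
    apply decide_eq_decide.mpr
    constructor
    · intro h c hc
      have := (h c hc).2
      rw [PySem.Dict.getD_counter] at this
      exact_mod_cast this
    · intro h c hc
      have hcnt := h c hc
      have hmem : c ∈ str1.toList := by
        have h1 : 1 ≤ str2.toList.count c := List.one_le_count_iff.mpr hc
        exact List.one_le_count_iff.mp (le_trans h1 hcnt)
      refine ⟨?_, ?_⟩
      · rw [PySem.Dict.contains_counter]
        exact List.contains_iff_mem.mpr hmem
      · rw [PySem.Dict.getD_counter]
        exact_mod_cast hcnt

-- ===== VERDICT (by name: the statement is the Claim_ definition above) =====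
theorem is_perm_v1_spec : Claim_equal_is_perm_v1 := by
  intro str1 str2 _
  unfold Spec_is_perm_v1
  rw [a_eq_decide, alt_eq_decide]
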